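-- pv_equiv track=rewrite | github.com/duqimeng/PromptPrompt | 1_select_statistic.py | one_seq
-- ===== SOURCE A (Python) =====
-- def one_seq(sequence):
--     bi_lst = []
--     tri_lst = []
--     fo_lst = []
--     five_lst = []
--     six_lst = []
--     for bi in ["".join(sequence[i:i+2]) for i in range(len(sequence)-1)]:
--         bi_lst.append(bi)
--
--     for tri in ["".join(sequence[i:i+3]) for i in range(len(sequence)-2)]:
--         tri_lst.append(tri)
--     for fo in ["".join(sequence[i:i+4]) for i in range(len(sequence)-3)]:
--         fo_lst.append(fo)
--     for five in ["".join(sequence[i:i+5]) for i in range(len(sequence)-4)]: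
--         five_lst.append(five)
--     for six in ["".join(sequence[i:i+6]) for i in range(len(sequence)-5)]:
--         six_lst.append(six)
--
--     fenci = bi_lst + tri_lst + fo_lst + five_lst +six_lst
--     return fenci
-- ===== SOURCE B (Python) =====
-- def one_seq(sequence):
--     # Incremental extension: (k+1)-grams are k-grams zipped with the sequence
--     # shifted by k, concatenated pairwise; collect stages for k = 2..6 in order.
--     fenci = []
--     prev = list(sequence)
--     for k in range(1, 6):
--         prev = [p + s for p, s in zip(prev, sequence[k:])]
--         fenci += prev
--     return fenci
-- ===== Notes on version B (the rewrite author's own statement) =====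
-- stated objective: alternative
-- what changed: Instead of five independent slice-and-join passes, B builds (k+1)-grams incrementally by zipping the previous k-grams with the sequence shifted by k and concatenating pairwise, collecting each stage; no slicing or join is used and earlier concatenations are reused.
import Mathlib
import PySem

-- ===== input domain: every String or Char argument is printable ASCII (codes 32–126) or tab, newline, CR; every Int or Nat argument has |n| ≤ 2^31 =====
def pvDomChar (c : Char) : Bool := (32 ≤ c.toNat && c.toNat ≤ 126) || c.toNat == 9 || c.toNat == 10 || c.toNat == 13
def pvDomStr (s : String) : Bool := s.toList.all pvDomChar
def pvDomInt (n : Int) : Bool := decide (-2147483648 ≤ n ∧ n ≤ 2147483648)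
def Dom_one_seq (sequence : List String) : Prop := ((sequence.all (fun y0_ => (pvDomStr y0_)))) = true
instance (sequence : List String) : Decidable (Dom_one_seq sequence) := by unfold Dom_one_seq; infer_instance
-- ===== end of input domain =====

-- B builds each (k+1)-gram by extending the previous k-gram with one element (zip with the shifted sequence) instead of A's five independent slice-and-join passes; same output, same cost.


-- ===== PORT A =====
def one_seq (sequence : List String) : List String :=
  let bi_lst : List String := []
  let tri_lst : List String := []
  let fo_lst : List String := []
  let five_lst : List String := []
  let six_lst : List String := []
  let bi_lst := ((PySem.List.pyRange 0 ((sequence.length : Int) - 1) 1).map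
      (fun i => PySem.Str.join "" (PySem.List.slice sequence (some i) (some (i + 2))))).foldl
      (fun acc bi => acc ++ [bi]) bi_lst
  let tri_lst := ((PySem.List.pyRange 0 ((sequence.length : Int) - 2) 1).map
      (fun i => PySem.Str.join "" (PySem.List.slice sequence (some i) (some (i + 3))))).foldl
      (fun acc tri => acc ++ [tri]) tri_lst
  let fo_lst := ((PySem.List.pyRange 0 ((sequence.length : Int) - 3) 1).map
      (fun i => PySem.Str.join "" (PySem.List.slice sequence (some i) (some (i + 4))))).foldl
      (fun acc fo => acc ++ [fo]) fo_lst
  let five_lst := ((PySem.List.pyRange 0 ((sequence.length : Int) - 4) 1).map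
      (fun i => PySem.Str.join "" (PySem.List.slice sequence (some i) (some (i + 5))))).foldl
      (fun acc five => acc ++ [five]) five_lst
  let six_lst := ((PySem.List.pyRange 0 ((sequence.length : Int) - 5) 1).map
      (fun i => PySem.Str.join "" (PySem.List.slice sequence (some i) (some (i + 6))))).foldl
      (fun acc six => acc ++ [six]) six_lst
  let fenci := bi_lst ++ tri_lst ++ fo_lst ++ five_lst ++ six_lst
  fenci

-- ===== PORT B =====
-- 'p + s' on strings is ported as PySem.Str.join "" [p, s] (Python-exact concatenation).
def one_seq_alt (sequence : List String) : List String :=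
  ((PySem.List.pyRange 1 6 1).foldl
    (fun (st : List String × List String) k =>
      let prev := (st.2.zip (PySem.List.slice sequence (some k) none)).map
        (fun ps => PySem.Str.join "" [ps.1, ps.2])
      (st.1 ++ prev, prev))
    ([], sequence)).1

-- ===== PRECONDITION & SPEC =====
def Spec_one_seq (sequence : List String) (out : List String) : Prop := out = one_seq_alt sequence
instance (sequence : List String) (out : List String) : Decidable (Spec_one_seq sequence out) := by unfold Spec_one_seq; infer_instance

-- ===== CLAIM =====
def Claim_equal_one_seq : Prop := ∀ (sequence : List String), Dom_one_seq sequence → Spec_one_seq sequence (one_seq sequence)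

-- ===== LEMMAS AND PROOFS =====

-- the list of k-grams of xs, in Nat form (used only to state the proof's invariant)
def gram (xs : List String) (k : Nat) : List String :=
  (List.range (xs.length + 1 - k)).map (fun i => PySem.Str.join "" ((xs.drop i).take k))

theorem joinApp (l : List (List Char)) (b : List Char) :
    PySem.Chars.join [] (l ++ [b]) = PySem.Chars.join [] l ++ b := by
  induction l with
  | nil => simp [PySem.Chars.join_singleton, PySem.Chars.join_nil]
  | cons h t ih => cases t with
    | nil => simp [PySem.Chars.join_singleton, PySem.Chars.join_cons_cons]
    | cons h2 t2 => simp [PySem.Chars.join_cons_cons] at ih ⊢; simp [ih]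

theorem joinPair (x y : List Char) : PySem.Chars.join [] [x, y] = x ++ y := by
  simpa [PySem.Chars.join_singleton] using joinApp [x] y

-- "".join of [a, b] where a = "".join L is "".join (L ++ [b])
theorem joinExt (L : List String) (b : String) :
    PySem.Str.join "" [PySem.Str.join "" L, b] = PySem.Str.join "" (L ++ [b]) := by
  apply String.toList_inj.mp
  simp [PySem.Str.toList_join, joinApp, joinPair]

theorem joinSingle (s : String) : PySem.Str.join "" [s] = s := by
  apply String.toList_inj.mp
  simp [PySem.Str.toList_join, PySem.Chars.join_singleton]

theorem gram_one (xs : List String) : gram xs 1 = xs := by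
  unfold gram
  apply List.ext_getElem (by simp)
  intro i h1 h2
  have hd : (xs.drop i).take 1 = [xs[i]] := by
    rw [List.take_one, List.head?_drop, List.getElem?_eq_getElem h2]
    rfl
  simp at h1
  simp [hd, joinSingle]

-- A's k-gram block (pyRange/slice form) is gram xs k
theorem blockA (xs : List String) (k : Nat) (_hk : 1 ≤ k) :
    (PySem.List.pyRange 0 ((xs.length : Int) - ((k : Int) - 1)) 1).map
      (fun i => PySem.Str.join "" (PySem.List.slice xs (some i) (some (i + (k : Int))))) =
    gram xs k := by
  by_cases h : xs.length + 1 ≤ k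
  · rw [PySem.List.pyRange_one_eq_nil (by omega)]
    simp [gram, Nat.sub_eq_zero_of_le (by omega)]
  · have ht : (xs.length : Int) - ((k : Int) - 1) = ((xs.length + 1 - k : Nat) : Int) := by
      push_cast [Nat.cast_sub (by omega : k ≤ xs.length + 1)]; ring
    rw [ht, PySem.List.pyRange_zero_natCast, List.map_map]
    unfold gram
    simp only [Function.comp_def, PySem.List.slice_natCast_add]

-- B's extension step: zipping k-grams with the sequence shifted by k gives the (k+1)-grams
theorem step (xs : List String) (k : Nat) (_hk : 1 ≤ k) :
    ((gram xs k).zip (xs.drop k)).map (fun ps => PySem.Str.join "" [ps.1, ps.2]) =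
    gram xs (k + 1) := by
  unfold gram
  apply List.ext_getElem (by simp; omega)
  intro i h1 h2
  have hi : i + k < xs.length := by simp at h2; omega
  have hg : i < xs.length + 1 - k := by omega
  have htake : (xs.drop i).take (k + 1) = (xs.drop i).take k ++ [xs[i + k]] := by
    rw [List.take_add_one]
    congr 1
    rw [List.getElem?_drop, List.getElem?_eq_getElem hi]
    rfl
  simp [List.getElem_zip, List.getElem_drop, joinExt, htake, Nat.add_comm]

-- ===== VERDICT =====
theorem one_seq_spec : Claim_equal_one_seq := by
  intro xs _
  unfold Spec_one_seq one_seq one_seq_alt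
  -- A's five blocks are gram xs 2 … gram xs 6
  have hA2 := blockA xs 2 (by norm_num)
  have hA3 := blockA xs 3 (by norm_num)
  have hA4 := blockA xs 4 (by norm_num)
  have hA5 := blockA xs 5 (by norm_num)
  have hA6 := blockA xs 6 (by norm_num)
  norm_num at hA2 hA3 hA4 hA5 hA6
  -- B's stages
  have hs1 : PySem.List.slice xs (some (1 : Int)) none = xs.drop 1 := by
    simpa using PySem.List.slice_from_natCast xs 1
  have hs2 : PySem.List.slice xs (some (2 : Int)) none = xs.drop 2 := by
    simpa using PySem.List.slice_from_natCast xs 2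
  have hs3 : PySem.List.slice xs (some (3 : Int)) none = xs.drop 3 := by
    simpa using PySem.List.slice_from_natCast xs 3
  have hs4 : PySem.List.slice xs (some (4 : Int)) none = xs.drop 4 := by
    simpa using PySem.List.slice_from_natCast xs 4
  have hs5 : PySem.List.slice xs (some (5 : Int)) none = xs.drop 5 := by
    simpa using PySem.List.slice_from_natCast xs 5
  have e1 := step xs 1 (by norm_num)
  rw [gram_one] at e1
  have e2 := step xs 2 (by norm_num)
  have e3 := step xs 3 (by norm_num)
  have e4 := step xs 4 (by norm_num)
  have e5 := step xs 5 (by norm_num)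
  simp only [Nat.reduceAdd] at e1 e2 e3 e4 e5
  have hr : PySem.List.pyRange 1 6 1 = [1, 2, 3, 4, 5] := by decide
  rw [hr]
  simp only [List.foldl, PySem.List.foldl_append_singleton_eq_self, List.nil_append,
    hs1, hs2, hs3, hs4, hs5, e1, e2, e3, e4, e5, hA2, hA3, hA4, hA5, hA6, List.append_assoc]
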